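-- pv_equiv track=rewrite | github.com/Moiman/FilmFellow | recommender/recommender_codes/movie/feature_formatter.py | feature_formatter
-- ===== SOURCE A (Python) =====
-- from typing import List
--
-- def feature_formatter(features: List[str]) -> List[str]:
--     """
--     Transforms the features to align them with the formatting of the dataframe
--     columns: Genres capitalized, except IMAX all caps, Sci-Fi and Film-Noir.
--     Tags are all lower case.
--
--     Args:
--         features (list: (str)): The movies features listed in no particular
--         order.
--
--     Returns:
--         list of strings: The movie features in right format.
--     """
--
--     genres = ["drama",
--               "comedy",
--               "thriller",
--               "romance",
--               "action",
--               "documentary",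
--               "horror",
--               "crime",
--               "adventure",
--               "sci-fi",
--               "animation",
--               "children",
--               "mystery",
--               "fantasy",
--               "war",
--               "western",
--               "film-noir",
--               "imax"]
--
--     for i in range(len(features)):
--         if features[i].lower() in genres:
--             if features[i].lower() == "imax":
--                 features[i] = "IMAX"
--             elif features[i].lower() == "sci-fi":
--                 features[i] = "Sci-Fi"
--             elif features[i].lower() == "film-noir":
--                 features[i] = "Film-Noir"
--             else:
--                 features[i] = features[i].capitalize()
--         else:
--             features[i] = features[i].lower()
--
--     return features
-- ===== SOURCE B (Python) =====
-- SPECIAL = {"imax": "IMAX", "sci-fi": "Sci-Fi", "film-noir": "Film-Noir"}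
-- GENRES = ["drama", "comedy", "thriller", "romance", "action", "documentary",
--           "horror", "crime", "adventure", "sci-fi", "animation", "children",
--           "mystery", "fantasy", "war", "western", "film-noir", "imax"]
--
-- def feature_formatter(features):
--     """Two staged passes, mutating in place: (1) lowercase every element;
--     (2) for each genre, scan the list and overwrite its occurrences with the
--     pretty form (fixed caps for imax/sci-fi/film-noir, capitalize otherwise).
--     Correct because formatted forms are never lowercase genre strings, so later
--     genre scans never re-match an already-replaced element."""
--     for i in range(len(features)):
--         features[i] = features[i].lower()
--     for g in GENRES:
--         pretty = SPECIAL.get(g, g.capitalize())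
--         for i in range(len(features)):
--             if features[i] == g:
--                 features[i] = pretty
--     return features
-- ===== Notes on version B (the rewrite author's own statement) =====
-- stated objective: alternative
-- what changed: Inverts the loop nesting: instead of one element-wise pass deciding each element's form via membership plus an if/elif cascade, B first lowercases the whole list in one pass, then iterates over the 18 genres and for each scans the list replacing that genre's occurrences with its pretty form (a staged scan-and-replace per genre).
import Mathlib
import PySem

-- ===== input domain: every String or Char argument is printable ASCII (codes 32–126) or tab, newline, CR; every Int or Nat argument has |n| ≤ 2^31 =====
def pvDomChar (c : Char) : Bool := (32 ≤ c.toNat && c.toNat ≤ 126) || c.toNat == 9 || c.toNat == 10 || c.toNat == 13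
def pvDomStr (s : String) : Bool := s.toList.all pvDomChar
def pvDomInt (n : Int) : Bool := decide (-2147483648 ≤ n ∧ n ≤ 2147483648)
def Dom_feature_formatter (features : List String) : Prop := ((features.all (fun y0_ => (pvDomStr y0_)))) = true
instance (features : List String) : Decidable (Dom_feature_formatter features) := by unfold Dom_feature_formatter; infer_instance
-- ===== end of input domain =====

-- B restages the work: one pass lowercasing the whole list, then a genre-outer pass
-- replacing each genre's occurrences with its pretty form (alternative decomposition,
-- same cost; return-value equivalence: both Pythons mutate the input list in place and return it).


-- ===== PORT A =====
-- str.capitalize() (exact on ASCII): first char uppercased, the rest lowercased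
def pyCapitalize (s : String) : String :=
  match s.toList with
  | [] => s
  | c :: rest => String.ofList (PySem.Chars.upperChar c :: rest.map PySem.Chars.lowerChar)

def genresA : List String :=
  ["drama", "comedy", "thriller", "romance", "action", "documentary",
   "horror", "crime", "adventure", "sci-fi", "animation", "children",
   "mystery", "fantasy", "war", "western", "film-noir", "imax"]

def feature_formatter (features : List String) : List String :=
  -- for i in range(len(features)): features[i] = …  (in-place update ↦ map)
  features.map (fun f =>
    if genresA.contains (PySem.Str.lower f) then
      if PySem.Str.lower f == "imax" then "IMAX"
      else if PySem.Str.lower f == "sci-fi" then "Sci-Fi"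
      else if PySem.Str.lower f == "film-noir" then "Film-Noir"
      else pyCapitalize f
    else PySem.Str.lower f)

-- ===== PORT B =====
def specialB : PySem.Dict String String :=
  PySem.Dict.ofList [("imax", "IMAX"), ("sci-fi", "Sci-Fi"), ("film-noir", "Film-Noir")]

def genresB : List String :=
  ["drama", "comedy", "thriller", "romance", "action", "documentary",
   "horror", "crime", "adventure", "sci-fi", "animation", "children",
   "mystery", "fantasy", "war", "western", "film-noir", "imax"]

def prettyB (g : String) : String := specialB.getD g (pyCapitalize g)

-- inner loop of pass 2: scan the list, replacing occurrences of g with pretty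
def passB (fs : List String) (g : String) : List String :=
  let pretty := prettyB g
  fs.map (fun x => if x == g then pretty else x)

def feature_formatter_alt (features : List String) : List String :=
  -- pass 1: features[i] = features[i].lower(); pass 2: for g in GENRES: scan & replace
  genresB.foldl passB (features.map PySem.Str.lower)

-- ===== PRECONDITION & SPEC =====
def Spec_feature_formatter (features : List String) (out : List String) : Prop := out = feature_formatter_alt features
instance (features : List String) (out : List String) : Decidable (Spec_feature_formatter features out) := by unfold Spec_feature_formatter; infer_instance

-- ===== CLAIM (what is proved, stated in full; the proofs are below) =====
def Claim_equal_feature_formatter : Prop := ∀ (features : List String), Dom_feature_formatter features → Spec_feature_formatter features (feature_formatter features)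

-- ===== LEMMAS AND PROOFS =====
theorem isupper_iff (d : Char) : PySem.Chars.isupper d = true ↔ (65 ≤ d.toNat ∧ d.toNat ≤ 90) := by
  simp only [PySem.Chars.isupper, Bool.and_eq_true, decide_eq_true_eq, Char.le_def,
    UInt32.le_iff_toNat_le]
  exact Iff.rfl

theorem islower_iff (d : Char) : PySem.Chars.islower d = true ↔ (97 ≤ d.toNat ∧ d.toNat ≤ 122) := by
  simp only [PySem.Chars.islower, Bool.and_eq_true, decide_eq_true_eq, Char.le_def,
    UInt32.le_iff_toNat_le]
  exact Iff.rfl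

theorem toNat_ofNat_add32 (d : Char) (h : d.toNat ≤ 90) :
    (Char.ofNat (d.toNat + 32)).toNat = d.toNat + 32 := by
  rw [Char.toNat_ofNat, if_pos (Or.inl (by omega))]

theorem up_low (c : Char) :
    PySem.Chars.upperChar (PySem.Chars.lowerChar c) = PySem.Chars.upperChar c := by
  unfold PySem.Chars.lowerChar
  by_cases h : PySem.Chars.isupper c = true
  · rw [if_pos h]
    rw [isupper_iff] at h
    have ht : (Char.ofNat (c.toNat + 32)).toNat = c.toNat + 32 := toNat_ofNat_add32 c h.2
    unfold PySem.Chars.upperChar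
    rw [if_pos (by rw [islower_iff, ht]; omega), if_neg (by rw [islower_iff]; omega), ht]
    apply Char.ext
    have : c.toNat + 32 - 32 = c.toNat := by omega
    simp only [Char.ofNat, this]
    rw [dif_pos (by exact Or.inl (by omega))]
    rfl
  · rw [if_neg h]

theorem low_idem (c : Char) :
    PySem.Chars.lowerChar (PySem.Chars.lowerChar c) = PySem.Chars.lowerChar c := by
  unfold PySem.Chars.lowerChar
  by_cases h : PySem.Chars.isupper c = true
  · rw [if_pos h]
    rw [isupper_iff] at h
    have ht : (Char.ofNat (c.toNat + 32)).toNat = c.toNat + 32 := toNat_ofNat_add32 c h.2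
    rw [if_neg (by rw [isupper_iff, ht]; omega)]
  · rw [if_neg h, if_neg h]

theorem cap_lower (s : String) : pyCapitalize (PySem.Str.lower s) = pyCapitalize s := by
  unfold pyCapitalize PySem.Str.lower PySem.Chars.lower
  rcases hs : s.toList with _ | ⟨c, rest⟩
  · simp only [List.map_nil, String.toList_ofList]
    calc String.ofList [] = String.ofList s.toList := by rw [hs]
      _ = s := String.ofList_toList
  · simp only [List.map_cons, String.toList_ofList, List.map_map]
    rw [up_low]
    have hmap : List.map (PySem.Chars.lowerChar ∘ PySem.Chars.lowerChar) rest
        = List.map PySem.Chars.lowerChar rest :=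
      List.map_congr_left (fun x _ => by simp only [Function.comp_apply, low_idem])
    rw [hmap]

-- a fold of element-wise passes over the list is the map of the folded per-element function
theorem foldl_map_comm {α β : Type} (step : β → α → α) (gs : List β) (xs : List α) :
    gs.foldl (fun fs g => fs.map (fun x => step g x)) xs
      = xs.map (fun x => gs.foldl (fun y g => step g y) x) := by
  induction gs generalizing xs with
  | nil => simp
  | cons g gs ih =>
    simp only [List.foldl_cons, ih, List.map_map]
    rfl

-- stepB is the per-element action of one passB sweep
def stepB (g y : String) : String := if y == g then prettyB g else y

theorem foldl_map_comm' {α β γ : Type} (step : β → α → α) (pre : γ → α) (gs : List β) (xs : List γ) :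
    gs.foldl (fun fs g => fs.map (fun x => step g x)) (xs.map pre)
      = xs.map (fun x => gs.foldl (fun y g => step g y) (pre x)) := by
  rw [foldl_map_comm]
  induction xs with
  | nil => rfl
  | cons a l ih => simp only [List.map_cons, List.cons.injEq]; exact ⟨trivial, ih⟩

theorem alt_eq (fs : List String) :
    feature_formatter_alt fs
      = fs.map (fun f => genresB.foldl (fun y g => stepB g y) (PySem.Str.lower f)) :=
  foldl_map_comm' stepB PySem.Str.lower genresB fs

set_option maxHeartbeats 3200000 in
theorem point (f : String) :
    genresB.foldl (fun y g => stepB g y) (PySem.Str.lower f)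
    = (if genresA.contains (PySem.Str.lower f) then
        if PySem.Str.lower f == "imax" then "IMAX"
        else if PySem.Str.lower f == "sci-fi" then "Sci-Fi"
        else if PySem.Str.lower f == "film-noir" then "Film-Noir"
        else pyCapitalize f
      else PySem.Str.lower f) := by
  by_cases h : genresA.contains (PySem.Str.lower f) = true
  · have hm : PySem.Str.lower f ∈ genresA := by simpa using h
    rw [← cap_lower f]
    simp only [genresA, List.mem_cons, List.not_mem_nil, or_false] at hm
    rcases hm with h' | h' | h' | h' | h' | h' | h' | h' | h' | h' | h' | h' | h' | h' | h' | h' | h' | h' <;>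
      rw [h'] <;> decide
  · rw [if_neg h]
    have hm : PySem.Str.lower f ∉ genresA := by simpa using h
    simp only [genresA, List.mem_cons, List.not_mem_nil, or_false, not_or] at hm
    obtain ⟨h1, h2, h3, h4, h5, h6, h7, h8, h9, h10, h11, h12, h13, h14, h15, h16, h17, h18⟩ := hm
    simp only [genresB, List.foldl_cons, List.foldl_nil, stepB, beq_iff_eq, if_neg h1, if_neg h2,
      if_neg h3, if_neg h4, if_neg h5, if_neg h6, if_neg h7, if_neg h8, if_neg h9, if_neg h10,
      if_neg h11, if_neg h12, if_neg h13, if_neg h14, if_neg h15, if_neg h16, if_neg h17,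
      if_neg h18]

-- ===== VERDICT (by name: the statement is the Claim_ definition above) =====
theorem feature_formatter_spec : Claim_equal_feature_formatter := by
  intro features _
  unfold Spec_feature_formatter feature_formatter
  rw [alt_eq]
  exact List.map_congr_left (fun f _ => (point f).symm)
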